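-- pv_equiv track=rewrite | github.com/ptm1225/Coding_test_python | 프로그래머스/3/12938. 최고의 집합/최고의 집합.py | solution
-- ===== SOURCE A (Python) =====
-- def solution(n, s):
--     if n > s:
--         return [-1]
--     else:
--         arr = [s//n]*n
--         z = s%n
--         i = -1
--         while z:
--             arr[i] += 1
--             i-=1
--             z-=1
--         return arr
-- ===== SOURCE B (Python) =====
-- def solution(n, s):
--     if n > s:
--         return [-1]
--     # greedy: each slot takes the floor of the remaining average; no remainder pass
--     out = []
--     while n > 0:
--         a = s // n
--         out.append(a)
--         s -= a
--         n -= 1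
--     return out
-- ===== Notes on version B (the rewrite author's own statement) =====
-- stated objective: alternative
-- what changed: Replaces A's uniform array plus a remainder-distributing increment loop by a single greedy pass: each element is the floor of the remaining sum over the remaining count, subtracted as it goes; no modulo/remainder is ever computed.
import Mathlib
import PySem

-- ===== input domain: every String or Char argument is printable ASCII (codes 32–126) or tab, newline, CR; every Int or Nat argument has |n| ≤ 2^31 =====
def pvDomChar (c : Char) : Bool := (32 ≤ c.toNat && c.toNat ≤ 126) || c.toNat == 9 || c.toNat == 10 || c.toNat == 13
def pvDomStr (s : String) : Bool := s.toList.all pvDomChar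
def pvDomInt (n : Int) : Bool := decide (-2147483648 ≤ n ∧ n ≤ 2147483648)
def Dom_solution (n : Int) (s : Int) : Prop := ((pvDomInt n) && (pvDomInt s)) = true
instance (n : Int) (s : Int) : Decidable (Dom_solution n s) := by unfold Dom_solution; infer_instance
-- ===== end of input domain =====

-- B replaces A's uniform array + remainder-distributing increment loop by a greedy
-- recursion (each element = floor of remaining sum / remaining count); objective: alternative.

-- ===== PORT A =====
-- arr[i] += 1 for a (possibly negative) Python index i; inside Pre_ the index is
-- always in range, so the out-of-range no-op of List.modify is never reached.
def pvIncAt (arr : List Int) (i : Int) : List Int :=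
  let j : Int := if i < 0 then i + arr.length else i
  arr.modify j.toNat (· + 1)

-- the while loop of A: z iterations (z ≥ 0 inside Pre_), incrementing arr[i] and decrementing i
def solutionLoop (arr : List Int) (i : Int) : Nat → List Int
  | 0 => arr
  | z + 1 => solutionLoop (pvIncAt arr i) (i - 1) z

def solution (n : Int) (s : Int) : List Int :=
  if n > s then [-1]
  else
    let arr := List.replicate n.toNat (PySem.Int.floordiv s n)
    let z := PySem.Int.mod s n
    solutionLoop arr (-1) z.toNat

-- ===== PORT B =====
-- the while loop of Source B: runs while n > 0, so exactly n.toNat iterations (fuel = n.toNat);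
-- the divisor at each step is the current n = k + 1
def solLoop : Nat → Int → List Int → List Int
  | 0, _, out => out
  | k + 1, s, out =>
    let a := PySem.Int.floordiv s ((k : Int) + 1)
    solLoop k (s - a) (out ++ [a])

def solution_alt (n : Int) (s : Int) : List Int :=
  if n > s then [-1] else solLoop n.toNat s []

-- ===== PRECONDITION & SPEC =====
-- Pre_ excludes exactly the inputs where A raises: n = 0 with n ≤ s (ZeroDivisionError),
-- and n < 0 with n ≤ s and s % n ≠ 0 (IndexError on the empty list).
def Pre_solution (n : Int) (s : Int) : Prop :=
  n > s ∨ 0 < n ∨ (n < 0 ∧ PySem.Int.mod s n = 0)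
instance (n : Int) (s : Int) : Decidable (Pre_solution n s) := by unfold Pre_solution; infer_instance
def pvWitness_solution : Int × Int := (3, 8)

def Spec_solution (n : Int) (s : Int) (out : List Int) : Prop := out = solution_alt n s
instance (n : Int) (s : Int) (out : List Int) : Decidable (Spec_solution n s out) := by unfold Spec_solution; infer_instance

-- ===== CLAIM (what is proved, stated in full; the proofs are below) =====
def Claim_equal_solution : Prop := ∀ (n : Int) (s : Int), Dom_solution n s → Pre_solution n s → Spec_solution n s (solution n s)

-- ===== LEMMAS AND PROOFS =====

-- One step of the loop at Python index -(tail.length+1) on replicate (k+1) q ++ tail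
lemma modify_replicate_mid (k : Nat) (q : Int) (tail : List Int) :
    (List.replicate k q ++ q :: tail).modify k (· + 1)
      = List.replicate k q ++ (q + 1) :: tail := by
  induction k with
  | zero => simp
  | succ k ih => simp [List.replicate_succ, List.modify_succ_cons, ih]

lemma pvIncAt_step (k : Nat) (q : Int) (tail : List Int) :
    pvIncAt (List.replicate (k + 1) q ++ tail) (-((tail.length : Int) + 1))
      = List.replicate k q ++ (q + 1) :: tail := by
  unfold pvIncAt
  have hlen : (((List.replicate (k + 1) q ++ tail).length : Nat) : Int) = (k : Int) + 1 + tail.length := by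
    simp
  simp only [hlen]
  have hneg : -((tail.length : Int) + 1) < 0 := by omega
  rw [if_pos hneg]
  have hidx : (-((tail.length : Int) + 1) + ((k : Int) + 1 + tail.length)).toNat = k := by omega
  rw [hidx]
  have : List.replicate (k + 1) q ++ tail = List.replicate k q ++ q :: tail := by
    rw [List.replicate_succ']; simp
  rw [this, modify_replicate_mid]

lemma loop_closed (r : Nat) : ∀ (k : Nat) (q : Int) (tail : List Int), r ≤ k →
    solutionLoop (List.replicate k q ++ tail) (-((tail.length : Int) + 1)) r
      = List.replicate (k - r) q ++ List.replicate r (q + 1) ++ tail := by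
  induction r with
  | zero => intro k q tail _; simp [solutionLoop]
  | succ r ih =>
    intro k q tail hr
    obtain ⟨k', rfl⟩ : ∃ k', k = k' + 1 := ⟨k - 1, by omega⟩
    unfold solutionLoop
    rw [pvIncAt_step]
    have h2 : -((tail.length : Int) + 1) - 1 = -((((q+1) :: tail).length : Int) + 1) := by
      simp; ring
    rw [h2, ih k' q ((q+1) :: tail) (by omega)]
    have : k' + 1 - (r + 1) = k' - r := by omega
    rw [this, List.replicate_succ' (n := r) (a := q+1)]
    simp

-- proof helper: the list Source B's loop appends, as a structural recursion
def pvBuild : Nat → Int → List Int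
  | 0, _ => []
  | k + 1, s =>
    let a := PySem.Int.floordiv s ((k : Int) + 1)
    a :: pvBuild k (s - a)

lemma solLoop_eq_append : ∀ (k : Nat) (s : Int) (out : List Int),
    solLoop k s out = out ++ pvBuild k s := by
  intro k
  induction k with
  | zero => intro s out; simp [solLoop, pvBuild]
  | succ k ih => intro s out; simp [solLoop, pvBuild, ih]

-- B's greedy loop reaches the same closed form
lemma build_closed : ∀ (k : Nat) (s : Int), 0 < k →
    pvBuild k s
      = List.replicate (k - (PySem.Int.mod s (k : Int)).toNat) (PySem.Int.floordiv s (k : Int))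
        ++ List.replicate (PySem.Int.mod s (k : Int)).toNat (PySem.Int.floordiv s (k : Int) + 1) := by
  intro k
  induction k with
  | zero => intro _ h; omega
  | succ k ih =>
    intro s _
    set a := PySem.Int.floordiv s ((k : Int) + 1) with ha
    set r := PySem.Int.mod s ((k : Int) + 1) with hr
    have hpos : (0 : Int) < (k : Int) + 1 := by positivity
    have hsum : a * ((k : Int) + 1) + r = s := PySem.Int.floordiv_mul_add_mod s ((k : Int) + 1)
    have hr0 : 0 ≤ r := PySem.Int.mod_nonneg s hpos
    have hrlt : r < (k : Int) + 1 := PySem.Int.mod_lt s hpos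
    show (a :: pvBuild k (s - a))
        = List.replicate ((k + 1) - r.toNat) a ++ List.replicate r.toNat (a + 1)
    rcases Nat.eq_zero_or_pos k with hk0 | hkpos
    · -- k = 0: one element, r = 0, a = s
      subst hk0
      have hr00 : r = 0 := by omega
      have has : a = s := by omega
      simp [pvBuild, hr00, has]
    · have hkposZ : (0 : Int) < (k : Int) := by exact_mod_cast hkpos
      by_cases hcase : r < (k : Int)
      · -- remainder fits in the tail: next quotient is a, next remainder r
        have hq : PySem.Int.floordiv (s - a) (k : Int) = a := by
          rw [PySem.Int.floordiv_eq_iff_of_pos hkposZ]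
          constructor <;> nlinarith
        have hm : PySem.Int.mod (s - a) (k : Int) = r := by
          have h3 := PySem.Int.floordiv_mul_add_mod (s - a) (k : Int)
          rw [hq] at h3
          have h4 : a * ((k : Int) + 1) = a * (k : Int) + a := by ring
          omega
        rw [ih (s - a) hkpos, hq, hm]
        have hk1 : (k + 1) - r.toNat = (k - r.toNat) + 1 := by omega
        rw [hk1, List.replicate_succ]
        simp
      · -- r = k: next value is a+1 everywhere, remainder 0
        have hrk : r = (k : Int) := by omega
        have hq : PySem.Int.floordiv (s - a) (k : Int) = a + 1 := by
          rw [PySem.Int.floordiv_eq_iff_of_pos hkposZ]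
          constructor <;> nlinarith
        have hm : PySem.Int.mod (s - a) (k : Int) = 0 := by
          have h3 := PySem.Int.floordiv_mul_add_mod (s - a) (k : Int)
          rw [hq] at h3
          have h4 : (a + 1) * (k : Int) = a * ((k : Int) + 1) - a + (k : Int) := by ring
          omega
        rw [ih (s - a) hkpos, hq, hm]
        have h1 : (k + 1) - r.toNat = 1 := by omega
        have h2 : r.toNat = k := by omega
        simp [h2]

-- ===== VERDICT (by name: the statement is the Claim_ definition above) =====
theorem solution_spec : Claim_equal_solution := by
  intro n s _ hpre
  unfold Spec_solution solution solution_alt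
  by_cases hgt : n > s
  · simp [hgt]
  · rw [if_neg hgt, if_neg hgt]
    simp only []
    rw [solLoop_eq_append]
    simp only [List.nil_append]
    rcases hpre with h | hpos | ⟨hneg, hmod⟩
    · exact absurd h hgt
    · set q := PySem.Int.floordiv s n with hq
      set r := PySem.Int.mod s n with hr
      have hr0 : 0 ≤ r := PySem.Int.mod_nonneg s hpos
      have hrn : r < n := PySem.Int.mod_lt s hpos
      have hle : r.toNat ≤ n.toNat := by omega
      have hA := loop_closed r.toNat n.toNat q ([] : List Int) hle
      simp only [List.length_nil, Int.ofNat_zero] at hA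
      norm_num at hA
      have hcast : ((n.toNat : Int)) = n := by omega
      have hB := build_closed n.toNat s (by omega)
      rw [hcast] at hB
      rw [hA, hB]
    · -- n < 0 and s % n = 0: both sides are []
      have h1 : n.toNat = 0 := by omega
      rw [hmod]
      simp [h1, solutionLoop, pvBuild]
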